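-- pv_equiv track=rewrite | github.com/svinther/AoC | 2023/a2.py | solve
-- ===== SOURCE A (Python) =====
-- from collections import defaultdict
--
-- def solve(parsed):
--     #12 red cubes, 13 green cubes, and 14 blue cubes
--     limits = {"red": 12, "green": 13, "blue": 14}
--     p1=0
--     p2=[]
--     for i, g in enumerate(parsed):
--         p2i=defaultdict(int)
--         p2.append(p2i)
--
--         OK=True
--         for s in g:
--             for t, n in s.items():
--                 if n > limits.get(t, 0):
--                     OK=False
--                 p2i[t] = max(p2i[t], n)
--         if OK:
--             p1+=i+1
--
--     powers =[ p2i["red"] * p2i["blue"] * p2i["green"] for p2i in p2]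
--
--     return p1, sum(powers)
-- ===== SOURCE B (Python) =====
-- def solve(parsed):
--     limits = {"red": 12, "green": 13, "blue": 14}
--
--     def tokens(g):
--         return [(t, n) for s in g for t, n in s.items()]
--
--     p1 = 0
--     for i, g in enumerate(parsed):
--         if all(n <= limits.get(t, 0) for t, n in tokens(g)):
--             p1 += i + 1
--
--     p2 = 0
--     for g in parsed:
--         ts = tokens(g)
--         power = 1
--         for c in ("red", "blue", "green"):
--             power *= max([0] + [n for t, n in ts if t == c])
--         p2 += power
--
--     return p1, p2
-- ===== Notes on version B (the rewrite author's own statement) =====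
-- stated objective: alternative
-- what changed: B keeps no per-game maxima dict at all: it flattens each game to a token list, decides part-1 validity by a direct all-tokens-within-limits test, and computes each game's power by three independent per-colour max scans over the token list, in two staged passes instead of A's single dict-building pass plus stored defaultdict list and final powers comprehension.
import Mathlib
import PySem

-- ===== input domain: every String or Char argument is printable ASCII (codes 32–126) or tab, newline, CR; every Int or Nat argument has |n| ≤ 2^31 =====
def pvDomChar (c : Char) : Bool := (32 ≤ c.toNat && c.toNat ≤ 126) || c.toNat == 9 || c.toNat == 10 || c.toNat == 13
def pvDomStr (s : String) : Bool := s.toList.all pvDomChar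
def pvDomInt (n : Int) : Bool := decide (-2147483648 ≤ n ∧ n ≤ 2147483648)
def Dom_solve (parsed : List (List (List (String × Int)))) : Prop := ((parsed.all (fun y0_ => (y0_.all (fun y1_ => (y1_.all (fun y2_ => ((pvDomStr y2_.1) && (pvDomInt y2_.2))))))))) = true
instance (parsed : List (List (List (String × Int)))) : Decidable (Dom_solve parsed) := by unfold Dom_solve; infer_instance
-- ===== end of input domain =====

-- B keeps no per-game maxima dict: it flattens each game to a token list, gets part 1 by a
-- direct all-within-limits test and part 2 by three per-colour max scans, in two staged passes
-- instead of A's single dict-building pass plus stored defaultdicts and final comprehension.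
-- Return value only; neither program mutates its argument. (objective: alternative)

-- ===== PORT A =====
-- limits = {"red": 12, "green": 13, "blue": 14}
def pvLimits : PySem.Dict String Int := PySem.Dict.ofList [("red", 12), ("green", 13), ("blue", 14)]

-- body of A's innermost loop: 'if n > limits.get(t, 0): OK=False' ; 'p2i[t] = max(p2i[t], n)'
def pvStepTok (st : Bool × PySem.Dict String Int) (tn : String × Int) : Bool × PySem.Dict String Int :=
  ((if tn.2 > pvLimits.getD tn.1 0 then false else st.1),
   st.2.insert tn.1 (max (st.2.getD tn.1 0) tn.2))

-- A's per-game loop 'for s in g: for t, n in s.items(): …' starting from OK=True, p2i=defaultdict(int)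
def pvGame (g : List (List (String × Int))) : Bool × PySem.Dict String Int :=
  g.foldl (fun st s => s.foldl pvStepTok st) (true, PySem.Dict.empty)

def solve (parsed : List (List (List (String × Int)))) : Int × Int :=
  let r := (PySem.List.enumerate parsed).foldl
    (fun (acc : Int × List (PySem.Dict String Int)) ig =>
      let inner := pvGame ig.2
      ((if inner.1 then acc.1 + ig.1 + 1 else acc.1), acc.2 ++ [inner.2]))
    (0, [])
  -- powers = [ p2i["red"] * p2i["blue"] * p2i["green"] for p2i in p2 ]  (defaultdict read = getD 0)
  let powers := r.2.map (fun d => d.getD "red" 0 * d.getD "blue" 0 * d.getD "green" 0)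
  (r.1, powers.foldl (· + ·) 0)

-- ===== PORT B =====
-- tokens(g) = [(t, n) for s in g for t, n in s.items()]
def pvTokens (g : List (List (String × Int))) : List (String × Int) :=
  g.flatMap (fun s => s)

-- the generator's test: n <= limits.get(t, 0)
def pvTok (tn : String × Int) : Bool := tn.2 ≤ pvLimits.getD tn.1 0

-- max([0] + [n for t, n in ts if t == c])
def pvColorMax (ts : List (String × Int)) (c : String) : Int :=
  ((ts.filter (fun tn => tn.1 == c)).map Prod.snd).foldl max 0

-- power = 1; for c in ("red","blue","green"): power *= max([0] + [n for t,n in ts if t == c])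
def pvPowerB (g : List (List (String × Int))) : Int :=
  let ts := pvTokens g
  (["red", "blue", "green"].foldl (fun r c => r * pvColorMax ts c) 1)

def solve_alt (parsed : List (List (List (String × Int)))) : Int × Int :=
  let p1 := (PySem.List.enumerate parsed).foldl
    (fun (a : Int) ig => if (pvTokens ig.2).all pvTok then a + ig.1 + 1 else a) 0
  let p2 := parsed.foldl (fun (a : Int) g => a + pvPowerB g) 0
  (p1, p2)

-- ===== PRECONDITION & SPEC =====
def Spec_solve (parsed : List (List (List (String × Int)))) (out : Int × Int) : Prop := out = solve_alt parsed
instance (parsed : List (List (List (String × Int)))) (out : Int × Int) : Decidable (Spec_solve parsed out) := by unfold Spec_solve; infer_instance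

-- ===== CLAIM =====
def Claim_equal_solve : Prop := ∀ (parsed : List (List (List (String × Int)))), Dom_solve parsed → Spec_solve parsed (solve parsed)

-- ===== LEMMAS AND PROOFS =====

theorem pvFoldlFlatten {α β : Type} (l : List (List α)) (f : β → α → β) (b : β) :
    l.foldl (fun a xs => xs.foldl f a) b = l.flatten.foldl f b := by
  induction l generalizing b with
  | nil => rfl
  | cons x xs ih => simp [List.foldl_append, ih]

-- A's OK flag over a token list is the conjunction of per-token checks
theorem pvFlag (ps : List (String × Int)) (b : Bool) (d : PySem.Dict String Int) :
    (ps.foldl pvStepTok (b, d)).1 = (b && ps.all pvTok) := by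
  induction ps generalizing b d with
  | nil => simp
  | cons tn ps ih =>
    simp only [List.foldl_cons, List.all_cons, pvStepTok, ih]
    by_cases h : tn.2 > pvLimits.getD tn.1 0
    · simp [h, pvTok, not_le.mpr h]
    · simp [h, pvTok, not_lt.mp h]

-- A's maxima read at a colour is the running max of that colour's tokens
theorem pvMaxRead (ps : List (String × Int)) (b : Bool) (d : PySem.Dict String Int) (c : String) :
    (ps.foldl pvStepTok (b, d)).2.getD c 0 =
      ((ps.filter (fun tn => tn.1 == c)).map Prod.snd).foldl max (d.getD c 0) := by
  induction ps generalizing b d with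
  | nil => rfl
  | cons tn ps ih =>
    simp only [List.foldl_cons, pvStepTok, List.filter_cons]
    by_cases h : tn.1 = c
    · simp [h, ih]
    · have hb : (tn.1 == c) = false := by simp [h]
      rw [ih]
      have : ((d.insert tn.1 (max (d.getD tn.1 0) tn.2)).getD c 0) = d.getD c 0 := by
        rw [PySem.Dict.getD_insert]; simp [Ne.symm h]
      simp [hb, this]

theorem pvGame_flag (g : List (List (String × Int))) :
    (pvGame g).1 = (pvTokens g).all pvTok := by
  have : pvGame g = g.flatten.foldl pvStepTok (true, PySem.Dict.empty) := by
    rw [pvGame, pvFoldlFlatten]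
  rw [this, pvFlag, pvTokens, List.flatMap_id']
  simp

theorem pvGame_getD (g : List (List (String × Int))) (c : String) :
    (pvGame g).2.getD c 0 = pvColorMax (pvTokens g) c := by
  have : pvGame g = g.flatten.foldl pvStepTok (true, PySem.Dict.empty) := by
    rw [pvGame, pvFoldlFlatten]
  rw [this, pvMaxRead, pvColorMax, pvTokens, List.flatMap_id']
  rfl

-- per-game power read through A's dict
def pvPow (d : PySem.Dict String Int) : Int :=
  d.getD "red" 0 * d.getD "blue" 0 * d.getD "green" 0

theorem pvPow_eq (g : List (List (String × Int))) : pvPow (pvGame g).2 = pvPowerB g := by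
  simp [pvPow, pvPowerB, pvGame_getD, List.foldl_cons, one_mul, List.foldl_nil]

-- part 1: the two enumerate folds agree
theorem pvP1 (xs : List (List (List (String × Int)))) (s a1 : Int)
    (l : List (PySem.Dict String Int)) :
    ((PySem.List.enumerate xs s).foldl
        (fun (acc : Int × List (PySem.Dict String Int)) ig =>
          let inner := pvGame ig.2
          ((if inner.1 then acc.1 + ig.1 + 1 else acc.1), acc.2 ++ [inner.2])) (a1, l)).1 =
      (PySem.List.enumerate xs s).foldl
        (fun (a : Int) ig => if (pvTokens ig.2).all pvTok then a + ig.1 + 1 else a) a1 := by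
  induction xs generalizing s a1 l with
  | nil => rfl
  | cons g gs ih =>
    rw [PySem.List.enumerate_cons]
    simp only [List.foldl_cons]
    rw [show (pvGame g).1 = (pvTokens g).all pvTok from pvGame_flag g]
    apply ih

-- part 2: B's running power sum equals the sum over A's accumulated dict list
theorem pvP2 (xs : List (List (List (String × Int)))) (s a1 : Int)
    (l : List (PySem.Dict String Int)) (b2 : Int)
    (h : b2 = (l.map pvPow).foldl (· + ·) 0) :
    xs.foldl (fun (a : Int) g => a + pvPowerB g) b2 =
      ((((PySem.List.enumerate xs s).foldl
        (fun (acc : Int × List (PySem.Dict String Int)) ig =>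
          let inner := pvGame ig.2
          ((if inner.1 then acc.1 + ig.1 + 1 else acc.1), acc.2 ++ [inner.2])) (a1, l)).2.map
          pvPow).foldl (· + ·) 0) := by
  induction xs generalizing s a1 l b2 with
  | nil => exact h
  | cons g gs ih =>
    rw [PySem.List.enumerate_cons]
    simp only [List.foldl_cons]
    apply ih
    rw [h, ← pvPow_eq g]
    simp [List.foldl_append]

-- ===== VERDICT =====
theorem solve_spec : Claim_equal_solve := by
  intro parsed _
  unfold Spec_solve solve solve_alt
  exact Prod.ext (pvP1 parsed 0 0 []) (pvP2 parsed 0 0 [] 0 rfl).symm
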